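-- pv_equiv track=rewrite | github.com/kosciukiewicz/recommendation-systems | collaborative_filtering/svd_collaborative_filtering.py | create_id_vocab
-- ===== SOURCE A (Python) =====
-- def create_id_vocab(data):
--     id_to_data_id_vocab = {}
--
--     id = 0
--     for i in data:
--         if i not in id_to_data_id_vocab.values():
--             id_to_data_id_vocab[id] = i
--             id += 1
--
--     return id_to_data_id_vocab, {v: k for k, v in id_to_data_id_vocab.items()}
-- ===== SOURCE B (Python) =====
-- def create_id_vocab(data):
--     # Walk the enumeration back-to-front so the overwrite of first[v] leaves the
--     # FIRST-occurrence index, then sort the values by that index.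
--     first = {v: i for i, v in reversed(list(enumerate(data)))}
--     unique = sorted(first, key=first.get)
--     return dict(enumerate(unique)), {v: i for i, v in enumerate(unique)}
-- ===== Notes on version B (the rewrite author's own statement) =====
-- stated objective: faster
-- what changed: B scans the enumeration in reverse building a value->first-index map by overwrite (no membership test), then sorts the values by that first index, instead of A's forward loop that scans the growing dict's values for each element.
import Mathlib
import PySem

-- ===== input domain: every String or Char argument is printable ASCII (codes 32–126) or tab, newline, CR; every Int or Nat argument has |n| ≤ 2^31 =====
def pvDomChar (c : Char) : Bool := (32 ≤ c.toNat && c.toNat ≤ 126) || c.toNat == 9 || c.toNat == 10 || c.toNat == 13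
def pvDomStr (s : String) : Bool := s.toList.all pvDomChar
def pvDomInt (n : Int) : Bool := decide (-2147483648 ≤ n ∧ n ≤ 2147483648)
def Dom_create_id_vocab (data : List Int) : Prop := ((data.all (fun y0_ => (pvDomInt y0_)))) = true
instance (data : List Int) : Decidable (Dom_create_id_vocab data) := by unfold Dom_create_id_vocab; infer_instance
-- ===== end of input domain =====

-- B scans the enumeration in reverse building a value→first-index dict by overwrite (no
-- membership test), then sorts the values by that first index (alternative decomposition).

-- ===== PORT A =====
-- the body of A's for-loop: 'if i not in d.values(): d[id] = i; id += 1'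
def pvStepA (st : PySem.Dict Int Int × Int) (i : Int) : PySem.Dict Int Int × Int :=
  if st.1.values.contains i then st else (st.1.insert st.2 i, st.2 + 1)

def create_id_vocab (data : List Int) : (List (Int × Int)) × (List (Int × Int)) :=
  let st := data.foldl pvStepA (PySem.Dict.empty, 0)
  (st.1.items, (st.1.items.foldl (fun e p => e.insert p.2 p.1) PySem.Dict.empty).items)

-- ===== PORT B =====
def create_id_vocab_alt (data : List Int) : (List (Int × Int)) × (List (Int × Int)) :=
  -- first = {v: i for i, v in reversed(list(enumerate(data)))}
  let first := ((PySem.List.enumerate data 0).reverse).foldl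
      (fun d p => d.insert p.2 p.1) (PySem.Dict.empty : PySem.Dict Int Int)
  -- unique = sorted(first, key=first.get); first.get v is always present on first's
  -- keys, so 'getD v 0' is exact there
  let unique := PySem.List.sorted first.keys (fun v => first.getD v 0) false
  let e := PySem.List.enumerate unique 0
  ((PySem.Dict.ofList e).items,
   (e.foldl (fun d p => d.insert p.2 p.1) PySem.Dict.empty).items)

-- ===== PRECONDITION & SPEC =====
def Spec_create_id_vocab (data : List Int) (out : (List (Int × Int)) × (List (Int × Int))) : Prop := out = create_id_vocab_alt data
instance (data : List Int) (out : (List (Int × Int)) × (List (Int × Int))) : Decidable (Spec_create_id_vocab data out) := by unfold Spec_create_id_vocab; infer_instance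

-- ===== CLAIM (what is proved, stated in full; the proofs are below) =====
def Claim_equal_create_id_vocab : Prop := ∀ (data : List Int), Dom_create_id_vocab data → Spec_create_id_vocab data (create_id_vocab data)

-- ===== LEMMAS AND PROOFS =====

-- ---- A side: the dict A maintains, as a function of the unique values collected so far
def pvDictOf (u : List Int) : PySem.Dict Int Int := PySem.Dict.mk (PySem.List.enumerate u 0)

lemma pvDictOf_keys (u : List Int) : (pvDictOf u).keys = PySem.List.pyRange 0 u.length 1 := by
  simp [pvDictOf, PySem.Dict.keys, PySem.List.map_fst_enumerate]

lemma pvDictOf_not_contains_len (u : List Int) : (pvDictOf u).contains (u.length : Int) = false := by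
  have : ((u.length : Int) ∈ (pvDictOf u).keys) = False := by
    simp [pvDictOf_keys, PySem.List.mem_pyRange_one]
  rw [PySem.Dict.contains_eq_decide_mem_keys]
  simp [this]

lemma pvDictOf_snoc (u : List Int) (i : Int) :
    (pvDictOf u).insert (u.length : Int) i = pvDictOf (u ++ [i]) := by
  apply PySem.Dict.ext
  rw [PySem.Dict.items_insert_of_not_contains _ i (pvDictOf_not_contains_len u)]
  simp [pvDictOf, PySem.List.enumerate_append, PySem.List.enumerate_cons,
    PySem.List.enumerate_nil]

lemma pvStepA_eq (u : List Int) (i : Int) :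
    pvStepA (pvDictOf u, (u.length : Int)) i
      = (pvDictOf (PySem.Set.add u i), ((PySem.Set.add u i).length : Int)) := by
  have hvals : (pvDictOf u).values = u := by
    simp [pvDictOf, PySem.Dict.values, PySem.List.map_snd_enumerate]
  unfold pvStepA
  by_cases h : i ∈ u
  · simp only [hvals, List.contains_eq_mem, h, decide_true, if_true]
    rw [PySem.Set.add_of_mem h]
  · simp only [hvals, List.contains_eq_mem, h, decide_false, Bool.false_eq_true, if_false]
    rw [PySem.Set.add_of_not_mem h, pvDictOf_snoc]
    simp

lemma pvLoopA (l u : List Int) :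
    l.foldl pvStepA (pvDictOf u, (u.length : Int))
      = (pvDictOf (PySem.Set.update u l), ((PySem.Set.update u l).length : Int)) := by
  induction l generalizing u with
  | nil => simp [PySem.Set.update_nil]
  | cons i l ih =>
    rw [List.foldl_cons, pvStepA_eq, ih, PySem.Set.update_cons]

lemma pvKeysNodup (u : List Int) :
    ((PySem.List.enumerate u 0).map (·.1)).Nodup := by
  have h := PySem.List.pairwise_lt_enumerate u (0 : Int)
  have := List.Pairwise.map (f := fun p : Int × Int => p.1)
    (fun {a b} (hab : a.1 < b.1) => hab) h
  exact this.imp (fun hab => ne_of_lt hab)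

lemma pvOfList_items (u : List Int) :
    (PySem.Dict.ofList (PySem.List.enumerate u 0)).items = PySem.List.enumerate u 0 := by
  have h := PySem.Dict.items_foldl_insert_fresh (l := PySem.List.enumerate u 0)
    (k := fun p : Int × Int => p.1) (v := fun p : Int × Int => p.2)
    (d := (PySem.Dict.empty : PySem.Dict Int Int))
    (by intro a _; simp [PySem.Dict.contains_empty]) (pvKeysNodup u)
  simpa [PySem.Dict.ofList] using h

-- ---- B side: the reversed-enumerate fold keeps, for each value, its FIRST index
lemma pvGetD_revFold (l : List (Int × Int)) (k d0 : Int) :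
    ((l.reverse).foldl (fun d p => d.insert p.2 p.1) (PySem.Dict.empty : PySem.Dict Int Int)).getD k d0
      = (match l.find? (fun p => p.2 == k) with | some p => p.1 | none => d0) := by
  induction l with
  | nil => simp [PySem.Dict.getD_empty]
  | cons p t ih =>
    rw [List.reverse_cons, List.foldl_append]
    simp only [List.foldl_cons, List.foldl_nil, List.find?_cons]
    by_cases h : p.2 = k
    · simp [h, PySem.Dict.getD_insert_self]
    · have hne : k ≠ p.2 := fun hh => h hh.symm
      have hbe : (p.2 == k) = false := by simp [h]
      rw [PySem.Dict.getD_insert_of_ne _ _ _ hne, ih]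
      simp only [hbe]

lemma pvFind_enumerate (data : List Int) (k : Int) :
    ∀ s : Int, k ∈ data →
      (PySem.List.enumerate data s).find? (fun p => p.2 == k)
        = some (s + (data.idxOf k : Int), k) := by
  induction data with
  | nil => intro s h; simp at h
  | cons x t ih =>
    intro s h
    rw [PySem.List.enumerate_cons, List.find?_cons]
    by_cases hx : x = k
    · subst hx
      simp [List.idxOf_cons_self]
    · have hk : k ∈ t := by
        cases List.mem_cons.1 h with
        | inl hh => exact absurd hh.symm hx
        | inr hh => exact hh
      have hbe : (x == k) = false := by simp [hx]
      simp only [hbe]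
      rw [ih (s + 1) hk, List.idxOf_cons_ne _ hx]
      congr 2
      push_cast
      ring

lemma pvFirst_getD (data : List Int) (k : Int) (h : k ∈ data) :
    (((PySem.List.enumerate data 0).reverse).foldl (fun d p => d.insert p.2 p.1)
        (PySem.Dict.empty : PySem.Dict Int Int)).getD k 0
      = (data.idxOf k : Int) := by
  rw [pvGetD_revFold, pvFind_enumerate data k 0 h]
  simp

lemma pvFirst_keys (data : List Int) :
    (((PySem.List.enumerate data 0).reverse).foldl (fun d p => d.insert p.2 p.1)
        (PySem.Dict.empty : PySem.Dict Int Int)).keys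
      = PySem.Set.ofList data.reverse := by
  rw [PySem.Dict.keys_foldl_insert_key (key := fun p : Int × Int => p.2)
      (f := fun _ p => p.1)]
  simp [PySem.Dict.keys_empty, PySem.Set.update_nil_left, PySem.List.map_snd_enumerate,
    List.map_reverse]

lemma pvDedup_pairwise (data : List Int) :
    (PySem.List.dedup data).Pairwise (fun a b => data.idxOf a < data.idxOf b) := by
  rw [PySem.List.dedup_eq_ofList]
  induction data using List.reverseRecOn with
  | nil => simp [PySem.Set.ofList_nil]
  | append_singleton xs x ih =>
    rw [PySem.Set.ofList_append_singleton]
    have hidx : ∀ a ∈ xs, (xs ++ [x]).idxOf a = xs.idxOf a := by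
      intro a ha
      exact List.idxOf_append_of_mem ha
    have hpw : (PySem.Set.ofList xs).Pairwise
        (fun a b => (xs ++ [x]).idxOf a < (xs ++ [x]).idxOf b) := by
      refine ih.imp_of_mem ?_
      intro a b ha hb hab
      rw [hidx a ((PySem.Set.mem_ofList _ _).1 ha), hidx b ((PySem.Set.mem_ofList _ _).1 hb)]
      exact hab
    by_cases hx : x ∈ xs
    · rw [PySem.Set.add_of_mem ((PySem.Set.mem_ofList _ _).2 hx)]
      exact hpw
    · rw [PySem.Set.add_of_not_mem (fun hc => hx ((PySem.Set.mem_ofList _ _).1 hc))]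
      rw [List.pairwise_append]
      refine ⟨hpw, by simp, ?_⟩
      intro a ha b hb
      rcases List.mem_singleton.1 hb with rfl
      have hax : a ∈ xs := (PySem.Set.mem_ofList _ _).1 ha
      rw [hidx a hax, List.idxOf_append_of_notMem hx]
      have h1 : xs.idxOf a < xs.length := List.idxOf_lt_length_of_mem hax
      simpa [List.idxOf_cons_self] using h1

lemma pvUnique_eq_dedup (data : List Int) :
    PySem.List.sorted
        ((((PySem.List.enumerate data 0).reverse).foldl (fun d p => d.insert p.2 p.1)
            (PySem.Dict.empty : PySem.Dict Int Int)).keys)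
        (fun v => (((PySem.List.enumerate data 0).reverse).foldl (fun d p => d.insert p.2 p.1)
            (PySem.Dict.empty : PySem.Dict Int Int)).getD v 0) false
      = PySem.List.dedup data := by
  apply PySem.List.sorted_eq_of_perm_of_pairwise_lt
  · -- (dedup data).Perm keys
    rw [pvFirst_keys]
    refine (List.perm_ext_iff_of_nodup (PySem.List.nodup_dedup data)
      (PySem.Set.nodup_ofList _)).2 ?_
    intro a
    simp [PySem.Set.mem_ofList]
  · -- strictly increasing under the first-index key
    refine (pvDedup_pairwise data).imp_of_mem ?_
    intro a b ha hb hab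
    have ha' : a ∈ data := (PySem.List.mem_dedup _ _).1 ha
    have hb' : b ∈ data := (PySem.List.mem_dedup _ _).1 hb
    rw [pvFirst_getD data a ha', pvFirst_getD data b hb']
    exact_mod_cast hab

-- ===== VERDICT (by name: the statement is the Claim_ definition above) =====
theorem create_id_vocab_spec : Claim_equal_create_id_vocab := by
  intro data _
  unfold Spec_create_id_vocab create_id_vocab create_id_vocab_alt
  simp only [pvUnique_eq_dedup]
  have hl := pvLoopA data []
  have h0 : (pvDictOf [], (([] : List Int).length : Int)) =
      ((PySem.Dict.empty : PySem.Dict Int Int), (0 : Int)) := rfl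
  rw [h0] at hl
  have hded : PySem.Set.update [] data = PySem.List.dedup data := by
    simp [PySem.Set.update_nil_left]
  rw [hded] at hl
  simp only [hl, pvDictOf, pvOfList_items]
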